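-- pv_equiv track=rewrite | github.com/ksaadDE/graphTesting | Button.py | calcMinimalPos
-- ===== SOURCE A (Python) =====
-- def calcMinimalPos(rect, borderWidth):
--     # prevents the "it goes out of the window"-'Bug' and it helps to determine the best position to have the border shown
--     posX = rect[0]
--     posY = rect[1]
--     while (posX-borderWidth) <= 0:
--             posX+=1
--     while (posY-borderWidth) <= 0:
--             posY+=1
--     return (posX, posY)
-- ===== SOURCE B (Python) =====
-- def calcMinimalPos(rect, borderWidth):
--     # closed form: smallest value >= original that exceeds borderWidth
--     return (max(rect[0], borderWidth + 1), max(rect[1], borderWidth + 1))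
-- ===== Notes on version B (the rewrite author's own statement) =====
-- stated objective: faster
-- what changed: Replaced the two increment-until-positive while loops by the closed form max(pos, borderWidth+1) per coordinate.
import Mathlib
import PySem

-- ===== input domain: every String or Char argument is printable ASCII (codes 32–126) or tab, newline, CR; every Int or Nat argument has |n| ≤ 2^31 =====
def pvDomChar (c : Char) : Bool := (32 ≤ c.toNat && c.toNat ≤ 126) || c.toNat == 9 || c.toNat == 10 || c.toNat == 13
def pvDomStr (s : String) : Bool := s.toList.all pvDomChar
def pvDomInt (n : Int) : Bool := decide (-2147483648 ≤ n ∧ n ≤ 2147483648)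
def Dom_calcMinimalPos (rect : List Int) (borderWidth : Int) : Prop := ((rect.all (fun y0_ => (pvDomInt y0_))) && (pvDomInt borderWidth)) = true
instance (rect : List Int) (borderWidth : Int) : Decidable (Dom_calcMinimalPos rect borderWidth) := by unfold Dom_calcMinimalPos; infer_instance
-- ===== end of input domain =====

-- B replaces the increment-until-positive while loops by the closed form max(pos, borderWidth+1): O(1) instead of O(borderWidth).

-- ===== PORT A =====
-- the 'while (p - b) <= 0: p += 1' loop, step for step
def pvLoopA (p b : Int) : Int :=
  if p - b ≤ 0 then pvLoopA (p + 1) b else p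
termination_by (b + 1 - p).toNat
decreasing_by omega

def calcMinimalPos (rect : List Int) (borderWidth : Int) : List Int :=
  match (PySem.List.pyGet? rect 0).getD 0, (PySem.List.pyGet? rect 1).getD 0 with
  | posX, posY => [pvLoopA posX borderWidth, pvLoopA posY borderWidth]

-- ===== PORT B =====
def calcMinimalPos_alt (rect : List Int) (borderWidth : Int) : List Int :=
  [max ((PySem.List.pyGet? rect 0).getD 0) (borderWidth + 1),
   max ((PySem.List.pyGet? rect 1).getD 0) (borderWidth + 1)]

-- ===== PRECONDITION & SPEC =====
-- A raises IndexError when rect has fewer than 2 elements; exactly those inputs are excluded.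
def Pre_calcMinimalPos (rect : List Int) (borderWidth : Int) : Prop := 2 ≤ rect.length
instance (rect : List Int) (borderWidth : Int) : Decidable (Pre_calcMinimalPos rect borderWidth) := by unfold Pre_calcMinimalPos; infer_instance
def pvWitness_calcMinimalPos : List Int × Int := ([3, -2], 4)

def Spec_calcMinimalPos (rect : List Int) (borderWidth : Int) (out : List Int) : Prop := out = calcMinimalPos_alt rect borderWidth
instance (rect : List Int) (borderWidth : Int) (out : List Int) : Decidable (Spec_calcMinimalPos rect borderWidth out) := by unfold Spec_calcMinimalPos; infer_instance

-- ===== CLAIM (what is proved, stated in full; the proofs are below) =====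
def Claim_equal_calcMinimalPos : Prop := ∀ (rect : List Int) (borderWidth : Int), Dom_calcMinimalPos rect borderWidth → Pre_calcMinimalPos rect borderWidth → Spec_calcMinimalPos rect borderWidth (calcMinimalPos rect borderWidth)

-- ===== LEMMAS AND PROOFS =====
theorem pvLoopA_eq_max (p b : Int) : pvLoopA p b = max p (b + 1) := by
  unfold pvLoopA
  split
  · rw [pvLoopA_eq_max (p + 1) b]; omega
  · omega
termination_by (b + 1 - p).toNat
decreasing_by omega

-- ===== VERDICT (by name: the statement is the Claim_ definition above) =====
theorem calcMinimalPos_spec : Claim_equal_calcMinimalPos := by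
  intro rect borderWidth _ _
  unfold Spec_calcMinimalPos calcMinimalPos calcMinimalPos_alt
  simp [pvLoopA_eq_max]
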